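-- pv_equiv track=rewrite | github.com/foundaway98/coding_test | 프로그래머스/lv2/92335. k진수에서 소수 개수 구하기/k진수에서 소수 개수 구하기.py | solution
-- ===== SOURCE A (Python) =====
-- import math
-- from collections import deque
--
-- def changeNumber(n,k):
--     changedNumber = []
--     while True:
--         changedNumber.append(n%k)
--         n = n//k
--         if n == 0:
--             break;
--     changedNumber.reverse()
--     return deque(changedNumber)
--
-- def checkPrime(n):
--     if n == 1:
--         return False
--     if n == 2:
--         return True
--     for i in range(2,math.ceil(math.sqrt(n)) + 1):
--         if n % i == 0:
--             return False
--     return True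
--
-- def solution(n, k):
--     answer = 0
--     nArr = changeNumber(n,k)
--
--
--     while nArr:
--         numStr = ""
--         for _ in range(len(nArr)):
--             item = nArr.popleft()
--             if item == 0:
--                 break
--             else:
--                 numStr += str(item)
--
--         if numStr == "":
--             continue
--         else:
--             if(checkPrime(int(numStr))):
--                 answer += 1
--
--
--         # if isPrime:
--         #     answer += 1
--         # else:
--         #     answer += 0
--
--     return answer
-- ===== SOURCE B (Python) =====
-- def _is_prime(v):
--     if v == 1:
--         return False
--     i = 2
--     while i * i <= v:
--         if v % i == 0:
--             return False
--         i += 1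
--     return True
--
--
-- def solution(n, k):
--     # One pass over the base-k digits from least to most significant: keep the
--     # current zero-free run as a decimal string (prepending each new, more
--     # significant digit) and flush it whenever a 0 digit appears.
--     count = 0
--     run = ""
--     m = n
--     while m > 0:
--         d = m % k
--         m //= k
--         if d == 0:
--             if run and _is_prime(int(run)):
--                 count += 1
--             run = ""
--         else:
--             run = str(d) + run
--     if run and _is_prime(int(run)):
--         count += 1
--     return count
-- ===== Notes on version B (the rewrite author's own statement) =====
-- stated objective: simpler
-- what changed: Replaces A's two-phase pipeline (build full digit list, reverse it, drain a deque with a nested popleft loop) by one fused loop over n that emits base-k digits least-significant first, maintaining the current zero-free run as a decimal string by prepending and flushing it on each 0 digit.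
import Mathlib
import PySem

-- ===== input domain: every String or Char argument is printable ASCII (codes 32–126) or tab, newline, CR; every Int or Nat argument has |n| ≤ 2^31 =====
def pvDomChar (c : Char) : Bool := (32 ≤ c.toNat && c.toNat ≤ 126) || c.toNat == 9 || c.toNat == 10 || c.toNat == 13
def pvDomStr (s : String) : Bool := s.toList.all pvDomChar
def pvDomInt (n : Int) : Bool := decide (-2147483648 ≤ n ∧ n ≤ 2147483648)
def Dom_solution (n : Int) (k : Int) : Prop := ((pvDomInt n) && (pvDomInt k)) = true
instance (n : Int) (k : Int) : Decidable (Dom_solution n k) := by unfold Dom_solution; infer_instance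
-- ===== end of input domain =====

-- B replaces A's pipeline (build the full digit list, reverse it, drain a deque with a
-- nested popleft loop) by one fused loop over n that emits base-k digits least-significant
-- first and keeps the current zero-free run as a string built by prepending (objective: simpler).

-- ===== PORT A =====

-- math.ceil(math.sqrt(v)) modelled as the true ceiling of the real square root of v ≥ 0
-- (any float-rounding deviation of CPython's sqrt cannot change checkPrime's result,
-- both bounds cover all candidate divisors up to the integer square root)
def pyCeilSqrt (v : Int) : Int :=
  if Nat.sqrt v.toNat * Nat.sqrt v.toNat = v.toNat then (Nat.sqrt v.toNat : Int)
  else (Nat.sqrt v.toNat : Int) + 1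

-- the 'for i in range(2, ceil+1)' loop of checkPrime
def checkPrimeLoop (n : Int) : List Int → Bool
  | [] => true
  | i :: rest => if PySem.Int.mod n i = 0 then false else checkPrimeLoop n rest

def checkPrime (n : Int) : Bool :=
  if n = 1 then false
  else if n = 2 then true
  else checkPrimeLoop n (PySem.List.pyRange 2 (pyCeilSqrt n + 1) 1)

-- the do-while digit loop of changeNumber; fuel n.toNat + 1 never runs out on Pre_ (proved below)
def changeLoop : Nat → Int → Int → List Int → List Int
  | 0, _, _, acc => acc
  | f + 1, m, k, acc =>
      let acc' := acc ++ [PySem.Int.mod m k]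
      let m' := PySem.Int.floordiv m k
      if m' = 0 then acc' else changeLoop f m' k acc'

def changeNumber (n k : Int) : List Int := (changeLoop (n.toNat + 1) n k []).reverse

-- the inner 'for _ in range(len(nArr))' popleft loop: the chars appended to numStr
-- (str(item) is PySem.Int.toChars) and the deque that remains afterwards
def popRun : List Int → List Char × List Int
  | [] => ([], [])
  | d :: rest =>
      if d = 0 then ([], rest)
      else
        let p := popRun rest
        (PySem.Int.toChars d ++ p.1, p.2)

lemma popRun_snd_length_le : ∀ l : List Int, ((popRun l).2).length ≤ l.length := by
  intro l
  induction l with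
  | nil => simp [popRun]
  | cons d rest ih =>
      by_cases hd : d = 0
      · simp [popRun, hd]
      · simp [popRun, hd]
        omega

lemma popRun_snd_length_lt (d : Int) (rest : List Int) :
    ((popRun (d :: rest)).2).length < (d :: rest).length := by
  by_cases hd : d = 0
  · simp [popRun, hd]
  · have := popRun_snd_length_le rest
    simp [popRun, hd]
    omega

-- the outer 'while nArr' loop; int(numStr) is PySem.Int.ofChars? (on Pre_ the string is a
-- nonempty decimal-digit string wherever it is parsed, so the .getD default is never taken)
def solLoop : List Int → Int → Int
  | [], acc => acc
  | d :: rest, acc =>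
      let p := popRun (d :: rest)
      solLoop p.2
        (if p.1 = [] then acc
         else if checkPrime ((PySem.Int.ofChars? p.1).getD 0) then acc + 1 else acc)
termination_by l _ => l.length
decreasing_by exact popRun_snd_length_lt d rest

def solution (n : Int) (k : Int) : Int := solLoop (changeNumber n k) 0

-- ===== PORT B =====

-- the 'while i * i <= v' trial-division loop of _is_prime
def isPrimeLoop (v i : Int) : Bool :=
  if i * i ≤ v then
    (if PySem.Int.mod v i = 0 then false else isPrimeLoop v (i + 1))
  else true
termination_by (v + 1 - i).toNat
decreasing_by
  rename_i h _
  have : 0 < v + 1 - i := by rcases (by omega : i ≤ 0 ∨ 0 < i) with hi | hi <;> nlinarith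
  omega

def isPrimeB (v : Int) : Bool := if v = 1 then false else isPrimeLoop v 2

-- 'if run and _is_prime(int(run)): count += 1'
def bFlush (run : List Char) (c : Int) : Int :=
  if run = [] then c
  else if isPrimeB ((PySem.Int.ofChars? run).getD 0) then c + 1 else c

-- the fused 'while m > 0' loop; fuel n.toNat + 1 never runs out on Pre_ (proved below)
def bLoop : Nat → Int → Int → List Char → Int → Int
  | 0, _, _, run, c => bFlush run c
  | f + 1, m, k, run, c =>
      if 0 < m then
        (if PySem.Int.mod m k = 0 then
          bLoop f (PySem.Int.floordiv m k) k [] (bFlush run c)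
        else
          bLoop f (PySem.Int.floordiv m k) k (PySem.Int.toChars (PySem.Int.mod m k) ++ run) c)
      else bFlush run c

def solution_alt (n : Int) (k : Int) : Int := bLoop (n.toNat + 1) n k [] 0

-- ===== PRECONDITION & SPEC =====
-- Pre_ is exactly the set of inputs on which A returns: outside it A raises
-- (k = 0: ZeroDivisionError; k ≤ -2 with n ≠ 0: a negative digit reaches int()/math.sqrt,
-- ValueError) or loops forever (k = 1 or k = -1 with n ≠ 0, and n < 0 with k ≥ 2).
def Pre_solution (n : Int) (k : Int) : Prop := (0 ≤ n ∧ 2 ≤ k) ∨ (n = 0 ∧ k ≠ 0)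
instance (n : Int) (k : Int) : Decidable (Pre_solution n k) := by unfold Pre_solution; infer_instance

def pvWitness_solution : Int × Int := (437674, 3)

def Spec_solution (n : Int) (k : Int) (out : Int) : Prop := out = solution_alt n k
instance (n : Int) (k : Int) (out : Int) : Decidable (Spec_solution n k out) := by unfold Spec_solution; infer_instance

-- ===== CLAIM (what is proved, stated in full; the proofs are below) =====
def Claim_equal_solution : Prop := ∀ (n : Int) (k : Int), Dom_solution n k → Pre_solution n k → Spec_solution n k (solution n k)

-- ===== LEMMAS AND PROOFS =====

-- ---------- the two primality tests agree on every Int ----------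

lemma checkPrimeLoop_iff (n : Int) (l : List Int) :
    checkPrimeLoop n l = true ↔ ∀ i ∈ l, ¬ (i ∣ n) := by
  induction l with
  | nil => simp [checkPrimeLoop]
  | cons i rest ih =>
      by_cases h : PySem.Int.mod n i = 0
      · simp [checkPrimeLoop, h, (PySem.Int.mod_eq_zero_iff_dvd n i).mp h]
      · have hstep : checkPrimeLoop n (i :: rest) = checkPrimeLoop n rest := by
          simp [checkPrimeLoop, h]
        rw [hstep, ih]
        simp only [List.mem_cons]
        constructor
        · intro hall j hj
          rcases hj with rfl | hj
          · exact fun hd => h ((PySem.Int.mod_eq_zero_iff_dvd n j).mpr hd)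
          · exact hall j hj
        · intro hall j hj
          exact hall j (Or.inr hj)

lemma isPrimeLoop_iff (v i : Int) (hi : 0 ≤ i) :
    isPrimeLoop v i = true ↔ ∀ j, i ≤ j → j * j ≤ v → ¬ (j ∣ v) := by
  rw [isPrimeLoop]
  by_cases h : i * i ≤ v
  · by_cases hm : PySem.Int.mod v i = 0
    · rw [if_pos h, if_pos hm]
      constructor
      · intro hfalse; cases hfalse
      · intro hall
        exact absurd ((PySem.Int.mod_eq_zero_iff_dvd v i).mp hm) (hall i le_rfl h)
    · rw [if_pos h, if_neg hm, isPrimeLoop_iff v (i + 1) (by omega)]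
      constructor
      · intro hall j hij hjv
        by_cases hji : j = i
        · subst hji
          exact fun hd => hm ((PySem.Int.mod_eq_zero_iff_dvd v j).mpr hd)
        · exact hall j (by omega) hjv
      · intro hall j hij hjv
        exact hall j (by omega) hjv
  · rw [if_neg h]
    constructor
    · intro _ j hij hjv
      exact absurd hjv (by nlinarith [mul_self_le_mul_self hi hij])
    · intro _; rfl
termination_by (v + 1 - i).toNat
decreasing_by
  have : 0 < v + 1 - i := by rcases (by omega : i ≤ 0 ∨ 0 < i) with hneg | hpos <;> nlinarith
  omega

lemma prime_eq (v : Int) : checkPrime v = isPrimeB v := by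
  rcases lt_trichotomy v 1 with hv | rfl | hv
  · -- v ≤ 0: both tests return true (the range is empty, resp. 2*2 > v)
    have h0 : v.toNat = 0 := by omega
    have hc : pyCeilSqrt v = 0 := by simp [pyCeilSqrt, h0]
    have hr : PySem.List.pyRange 2 (pyCeilSqrt v + 1) 1 = [] := by
      rw [hc]; exact PySem.List.pyRange_one_eq_nil (by omega)
    have hb : isPrimeLoop v 2 = true := by
      rw [isPrimeLoop]; simp only [if_neg (by omega : ¬ (2 : Int) * 2 ≤ v)]
    simp [checkPrime, hr, checkPrimeLoop, isPrimeB, hb]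
  · simp [checkPrime, isPrimeB]
  · rcases eq_or_lt_of_le (by omega : (2 : Int) ≤ v) with rfl | hv3
    · have hb : isPrimeLoop 2 2 = true := by
        rw [isPrimeLoop]; simp only [if_neg (by omega : ¬ (2 : Int) * 2 ≤ 2)]
      simp [checkPrime, isPrimeB, hb]
    · -- v ≥ 3
      have hvt : ((v.toNat : Nat) : Int) = v := by omega
      have hs1 : (Nat.sqrt v.toNat : Int) * (Nat.sqrt v.toNat : Int) ≤ v := by
        rw [← hvt]
        exact_mod_cast (by simpa [pow_two] using Nat.sqrt_le' v.toNat :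
          Nat.sqrt v.toNat * Nat.sqrt v.toNat ≤ v.toNat)
      have hs2 : v < ((Nat.sqrt v.toNat : Int) + 1) * ((Nat.sqrt v.toNat : Int) + 1) := by
        rw [← hvt]
        exact_mod_cast (by simpa [pow_two, Nat.succ_eq_add_one] using Nat.lt_succ_sqrt' v.toNat :
          v.toNat < (Nat.sqrt v.toNat + 1) * (Nat.sqrt v.toNat + 1))
      have hrnn : (0 : Int) ≤ (Nat.sqrt v.toNat : Int) := by positivity
      have hcp : checkPrime v = checkPrimeLoop v (PySem.List.pyRange 2 (pyCeilSqrt v + 1) 1) := by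
        rw [checkPrime, if_neg (by omega : ¬ v = 1), if_neg (by omega : ¬ v = 2)]
      have hbp : isPrimeB v = isPrimeLoop v 2 := by
        rw [isPrimeB, if_neg (by omega : ¬ v = 1)]
      rw [hcp, hbp, Bool.eq_iff_iff, checkPrimeLoop_iff, isPrimeLoop_iff v 2 (by omega)]
      by_cases hsq : Nat.sqrt v.toNat * Nat.sqrt v.toNat = v.toNat
      · -- perfect square: the bound is exactly the integer square root
        have hcs : pyCeilSqrt v = (Nat.sqrt v.toNat : Int) := by simp [pyCeilSqrt, hsq]
        have hveq : (Nat.sqrt v.toNat : Int) * (Nat.sqrt v.toNat : Int) = v := by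
          rw [← hvt]; exact_mod_cast hsq
        rw [hcs]
        constructor
        · intro hall j h2j hjj
          apply hall j
          rw [PySem.List.mem_pyRange_one]
          refine ⟨h2j, ?_⟩
          nlinarith
        · intro hall i hmem
          obtain ⟨h2i, hic⟩ := PySem.List.mem_pyRange_one.mp hmem
          exact hall i h2i (by nlinarith)
      · -- not a square: the bound is the integer square root + 1; pair up a large divisor
        have hcs : pyCeilSqrt v = (Nat.sqrt v.toNat : Int) + 1 := by simp [pyCeilSqrt, hsq]
        have hvne : (Nat.sqrt v.toNat : Int) * (Nat.sqrt v.toNat : Int) ≠ v := by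
          rw [← hvt]; exact_mod_cast fun h => hsq (by exact_mod_cast h)
        have hslt : (Nat.sqrt v.toNat : Int) * (Nat.sqrt v.toNat : Int) < v := by
          omega
        rw [hcs]
        constructor
        · intro hall j h2j hjj
          apply hall j
          rw [PySem.List.mem_pyRange_one]
          refine ⟨h2j, ?_⟩
          nlinarith
        · intro hall i hmem hdvd
          obtain ⟨h2i, hic⟩ := PySem.List.mem_pyRange_one.mp hmem
          by_cases hii : i * i ≤ v
          · exact hall i h2i hii hdvd
          · have hir : i = (Nat.sqrt v.toNat : Int) + 1 := by
              have : ¬ i ≤ (Nat.sqrt v.toNat : Int) := fun h => hii (by nlinarith)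
              omega
            obtain ⟨j, hj⟩ := hdvd
            have hjpos : 0 < j := by
              rcases (by omega : j ≤ 0 ∨ 0 < j) with h | h
              · nlinarith
              · exact h
            have hjlt : j < i := by nlinarith
            have hj2 : 2 ≤ j := by
              rcases (by omega : j = 1 ∨ 2 ≤ j) with rfl | h
              · exfalso; nlinarith
              · exact h
            have hjj : j * j ≤ v := by nlinarith
            exact hall j hj2 hjj ⟨i, by rw [hj, mul_comm]⟩

-- ---------- the reference digit list (low-order digit first) ----------

lemma floordiv_toNat (m k : Int) (hm : 0 ≤ m) (hk : 2 ≤ k) :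
    PySem.Int.floordiv m k = ((m.toNat / k.toNat : Nat) : Int) := by
  have h := PySem.Int.floordiv_natCast m.toNat k.toNat
  rw [(by omega : ((m.toNat : Nat) : Int) = m), (by omega : ((k.toNat : Nat) : Int) = k)] at h
  exact h

def digsI (m k : Int) : List Int :=
  if h : 1 ≤ m ∧ 2 ≤ k then
    PySem.Int.mod m k :: digsI (PySem.Int.floordiv m k) k
  else []
termination_by m.toNat
decreasing_by
  obtain ⟨hm, hk⟩ := h
  rw [floordiv_toNat m k (by omega) hk]
  have := Nat.div_lt_self (n := m.toNat) (by omega) (by omega : 1 < k.toNat)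
  omega

-- ---------- A's digit loop computes the reference list ----------

lemma changeLoop_eq : ∀ (f : Nat) (m k : Int) (acc : List Int), 0 ≤ m → 2 ≤ k → m.toNat < f →
    changeLoop f m k acc = acc ++ (if m = 0 then [0] else digsI m k) := by
  intro f
  induction f with
  | zero => intro m k acc _ _ hf; omega
  | succ f ih =>
      intro m k acc hm hk hf
      by_cases hm0 : m = 0
      · subst hm0
        simp [changeLoop, PySem.Int.mod, PySem.Int.floordiv]
      · have hm1 : 1 ≤ m := by omega
        have hfd := floordiv_toNat m k hm hk
        rw [if_neg hm0, digsI, dif_pos ⟨hm1, hk⟩]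
        simp only [changeLoop]
        by_cases hz : PySem.Int.floordiv m k = 0
        · rw [if_pos hz, digsI, hz, dif_neg (by omega)]
        · rw [if_neg hz]
          have hm'nn : 0 ≤ PySem.Int.floordiv m k := by rw [hfd]; positivity
          have hm'lt : (PySem.Int.floordiv m k).toNat < f := by
            rw [hfd]
            have := Nat.div_lt_self (n := m.toNat) (by omega) (by omega : 1 < k.toNat)
            omega
          rw [ih _ k _ hm'nn hk hm'lt, if_neg hz]
          simp

-- ---------- B's fused loop over the reference list ----------

def bProc : List Int → List Char → Int → Int
  | [], run, c => bFlush run c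
  | d :: L, run, c =>
      if d = 0 then bProc L [] (bFlush run c)
      else bProc L (PySem.Int.toChars d ++ run) c

lemma bLoop_eq : ∀ (f : Nat) (m k : Int) (run : List Char) (c : Int),
    0 ≤ m → 2 ≤ k → m.toNat < f → bLoop f m k run c = bProc (digsI m k) run c := by
  intro f
  induction f with
  | zero => intro m k run c _ _ h; omega
  | succ f ih =>
      intro m k run c hm hk hf
      by_cases hm0 : 0 < m
      · have hfd := floordiv_toNat m k hm hk
        have hm'nn : 0 ≤ PySem.Int.floordiv m k := by rw [hfd]; positivity
        have hm'lt : (PySem.Int.floordiv m k).toNat < f := by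
          rw [hfd]
          have := Nat.div_lt_self (n := m.toNat) (by omega) (by omega : 1 < k.toNat)
          omega
        rw [digsI, dif_pos ⟨by omega, hk⟩]
        simp only [bLoop, if_pos hm0]
        by_cases hd : PySem.Int.mod m k = 0
        · rw [if_pos hd, ih _ k _ _ hm'nn hk hm'lt]
          simp [bProc, hd]
        · rw [if_neg hd, ih _ k _ _ hm'nn hk hm'lt]
          simp [bProc, hd]
      · have hmz : m = 0 := by omega
        subst hmz
        rw [digsI, dif_neg (by omega)]
        simp [bLoop, bProc]

-- ---------- flush algebra and the order-reversal argument ----------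

lemma bFlush_comm (r s : List Char) (c : Int) : bFlush r (bFlush s c) = bFlush s (bFlush r c) := by
  unfold bFlush
  split_ifs <;> omega

-- forward (most-significant-first) processing with a pending trailing string t
def fwdT : List Int → List Char → List Char → Int → Int
  | [], cur, t, c => bFlush (cur ++ t) c
  | d :: D, cur, t, c =>
      if d = 0 then fwdT D [] t (bFlush cur c)
      else fwdT D (cur ++ PySem.Int.toChars d) t c

lemma fwdT_append_zero : ∀ (D : List Int) (cur t : List Char) (c : Int),
    fwdT (D ++ [0]) cur t c = fwdT D cur [] (bFlush t c) := by
  intro D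
  induction D with
  | nil => intro cur t c; simp [fwdT, bFlush_comm]
  | cons d D ih =>
      intro cur t c
      by_cases hd : d = 0
      · subst hd
        simp only [List.cons_append, fwdT, ih]
        rw [bFlush_comm t cur c]
      · simp [fwdT, hd, ih]

lemma fwdT_append_nz : ∀ (D : List Int) (cur t : List Char) (c : Int) (d : Int), d ≠ 0 →
    fwdT (D ++ [d]) cur t c = fwdT D cur (PySem.Int.toChars d ++ t) c := by
  intro D
  induction D with
  | nil => intro cur t c d hd; simp [fwdT, hd, List.append_assoc]
  | cons e D ih =>
      intro cur t c d hd
      by_cases he : e = 0 <;> simp [fwdT, he, ih _ _ _ _ hd]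

lemma bProc_eq_fwdT : ∀ (L : List Int) (t : List Char) (c : Int),
    bProc L t c = fwdT L.reverse [] t c := by
  intro L
  induction L with
  | nil => intro t c; simp [bProc, fwdT]
  | cons d L ih =>
      intro t c
      by_cases hd : d = 0
      · subst hd
        simp only [bProc, List.reverse_cons, fwdT_append_zero]
        exact ih [] (bFlush t c)
      · simp only [bProc, if_neg hd, List.reverse_cons, fwdT_append_nz _ _ _ _ _ hd]
        exact ih _ c

-- ---------- A's deque-draining loop is the same forward processing ----------

lemma aFlush_eq (s : List Char) (acc : Int) :
    (if s = [] then acc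
     else if checkPrime ((PySem.Int.ofChars? s).getD 0) then acc + 1 else acc) = bFlush s acc := by
  unfold bFlush
  rw [prime_eq]

lemma solLoop_step (E : List Int) (x : Int) :
    solLoop E x = solLoop (popRun E).2 (bFlush (popRun E).1 x) := by
  cases E with
  | nil => simp [solLoop, popRun, bFlush]
  | cons d rest =>
      rw [solLoop]
      rw [aFlush_eq]

lemma fwdT_eq_solLoop : ∀ (D : List Int) (cur : List Char) (c : Int),
    fwdT D cur [] c = solLoop (popRun D).2 (bFlush (cur ++ (popRun D).1) c) := by
  intro D
  induction D with
  | nil => intro cur c; simp [fwdT, popRun, solLoop]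
  | cons d E ih =>
      intro cur c
      by_cases hd : d = 0
      · subst hd
        have hp : popRun ((0 : Int) :: E) = ([], E) := by simp [popRun]
        have hl : fwdT ((0 : Int) :: E) cur [] c = fwdT E [] [] (bFlush cur c) := by
          simp [fwdT]
        rw [hl, ih, hp]
        simp only [List.nil_append, List.append_nil]
        exact (solLoop_step E (bFlush cur c)).symm
      · have hp : popRun (d :: E) = (PySem.Int.toChars d ++ (popRun E).1, (popRun E).2) := by
          simp [popRun, hd]
        have hl : fwdT (d :: E) cur [] c = fwdT E (cur ++ PySem.Int.toChars d) [] c := by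
          simp [fwdT, hd]
        rw [hl, ih, hp]
        simp [List.append_assoc]

lemma solLoop_eq_fwdT (D : List Int) (c : Int) : solLoop D c = fwdT D [] [] c := by
  rw [fwdT_eq_solLoop, List.nil_append, ← solLoop_step]

-- ===== VERDICT (by name: the statement is the Claim_ definition above) =====
theorem solution_spec : Claim_equal_solution := by
  unfold Claim_equal_solution
  intro n k _ hpre
  unfold Spec_solution solution solution_alt changeNumber
  by_cases hn : n = 0
  · subst hn
    simp [changeLoop, PySem.Int.mod, PySem.Int.floordiv, solLoop, popRun, bLoop, bFlush]
  · have hnk : 1 ≤ n ∧ 2 ≤ k := by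
      rcases hpre with ⟨h1, h2⟩ | ⟨h1, _⟩
      · exact ⟨by omega, h2⟩
      · exact absurd h1 hn
    rw [changeLoop_eq (n.toNat + 1) n k [] (by omega) hnk.2 (by omega),
        if_neg hn, List.nil_append, solLoop_eq_fwdT,
        bLoop_eq (n.toNat + 1) n k [] 0 (by omega) hnk.2 (by omega),
        bProc_eq_fwdT]
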